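-- pv_equiv track=rewrite | github.com/robertgvds/Myocardits-ML | analise-de-dados/reorganizar-splits.py | divide_into_groups
-- ===== SOURCE A (Python) =====
-- def divide_into_groups(individuals, num_groups, target_sum):
--     # Cria grupos vazios e suas somas
--     groups = [[] for _ in range(num_groups)]
--     group_sums = [0] * num_groups
--
--     # Ordena os indivíduos pela soma em ordem decrescente
--     sorted_individuals = sorted(individuals, key=lambda x: x[1], reverse=True)
--
--     # Atribui cada indivíduo ao grupo com a menor soma atual
--     for individual in sorted_individuals:
--         # Encontra o grupo com a menor soma atual
--         min_group_index = group_sums.index(min(group_sums))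
--         groups[min_group_index].append(individual)
--         group_sums[min_group_index] += individual[1]
--
--     return groups, group_sums
-- ===== SOURCE B (Python) =====
-- # Priority queue kept as a list of (sum, index) pairs sorted ascending: pop the
-- # head (lightest group, lowest index on ties) and re-insert in order, instead of
-- # rescanning all group sums with min+index on every step.
-- def divide_into_groups(individuals, num_groups, target_sum):
--     groups = [[] for _ in range(num_groups)]
--     group_sums = [0] * num_groups
--     pq = [(0, i) for i in range(num_groups)]
--     for individual in sorted(individuals, key=lambda x: x[1], reverse=True):
--         s, i = pq[0]
--         pq = pq[1:]
--         groups[i].append(individual)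
--         s += individual[1]
--         group_sums[i] = s
--         j = 0
--         while j < len(pq) and pq[j] < (s, i):
--             j += 1
--         pq.insert(j, (s, i))
--     return groups, group_sums
-- ===== Notes on version B (the rewrite author's own statement) =====
-- stated objective: alternative
-- what changed: A rescans the whole group_sums list with min()+index() for every individual; B maintains a priority queue of (sum, index) pairs kept as a sorted list, popping the head and re-inserting the updated pair in order.
import Mathlib
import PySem

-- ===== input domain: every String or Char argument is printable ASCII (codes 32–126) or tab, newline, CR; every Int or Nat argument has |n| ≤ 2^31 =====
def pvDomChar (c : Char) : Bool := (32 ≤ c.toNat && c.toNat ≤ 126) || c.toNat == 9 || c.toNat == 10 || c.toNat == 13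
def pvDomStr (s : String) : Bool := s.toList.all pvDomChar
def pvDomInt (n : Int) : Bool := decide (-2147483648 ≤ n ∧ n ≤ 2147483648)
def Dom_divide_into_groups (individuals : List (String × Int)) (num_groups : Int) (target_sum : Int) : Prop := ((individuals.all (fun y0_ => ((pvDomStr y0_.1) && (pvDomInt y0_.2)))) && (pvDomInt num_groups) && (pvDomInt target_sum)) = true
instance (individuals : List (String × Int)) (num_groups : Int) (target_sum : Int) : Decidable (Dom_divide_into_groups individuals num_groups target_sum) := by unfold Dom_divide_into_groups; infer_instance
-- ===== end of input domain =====

-- B replaces A's per-item full rescan of the group sums (min + index) by a priority queue of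
-- (sum, index) pairs kept as a sorted list: pop the head, re-insert in order (objective: alternative).

-- ===== PORT A =====
-- loop body of A: find the group with the least current sum (first such index), append, add
def pvStepA (st : List (List (String × Int)) × List Int) (ind : String × Int) :
    List (List (String × Int)) × List Int :=
  let m := (PySem.List.min? st.2 (fun x => x)).getD 0      -- min(group_sums); .getD unreachable under Pre_
  let j := (PySem.List.index? st.2 m).getD 0               -- group_sums.index(m)
  (st.1.modify j (fun g => g ++ [ind]), st.2.set j (st.2.getD j 0 + ind.2))

def divide_into_groups (individuals : List (String × Int)) (num_groups : Int) (target_sum : Int) :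
    (List (List (String × Int))) × List Int :=
  -- [[] for _ in range(num_groups)] and [0] * num_groups (both empty for num_groups ≤ 0)
  let groups : List (List (String × Int)) := List.replicate num_groups.toNat []
  let group_sums : List Int := List.replicate num_groups.toNat 0
  (PySem.List.sorted individuals (fun x => x.2) true).foldl pvStepA (groups, group_sums)

-- ===== PORT B =====
-- the while-loop insertion of Source B: insert p in front of the first entry not tuple-< p
def pvInsertPQ (p : Int × Int) : List (Int × Int) → List (Int × Int)
  | [] => [p]
  | q :: t => if q.1 < p.1 ∨ (q.1 = p.1 ∧ q.2 < p.2) then q :: pvInsertPQ p t else p :: q :: t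

-- loop body of B: pop the head of the sorted queue, append, re-insert the updated pair
def pvStepB (st : (List (List (String × Int)) × List Int) × List (Int × Int)) (ind : String × Int) :
    (List (List (String × Int)) × List Int) × List (Int × Int) :=
  match st.2 with
  | [] => st                                              -- unreachable under Pre_ (pq[0] raises)
  | (s, i) :: rest =>
      let s' := s + ind.2
      ((st.1.1.modify i.toNat (fun g => g ++ [ind]), st.1.2.set i.toNat s'),
       pvInsertPQ (s', i) rest)

def divide_into_groups_alt (individuals : List (String × Int)) (num_groups : Int) (target_sum : Int) :
    (List (List (String × Int))) × List Int :=
  let groups : List (List (String × Int)) := List.replicate num_groups.toNat []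
  let group_sums : List Int := List.replicate num_groups.toNat 0
  let pq : List (Int × Int) := (List.range num_groups.toNat).map (fun i : Nat => ((0 : Int), (i : Int)))
  ((PySem.List.sorted individuals (fun x => x.2) true).foldl pvStepB ((groups, group_sums), pq)).1

-- ===== PRECONDITION & SPEC =====
-- Pre_ excludes only inputs where the Python A raises: with num_groups < 1 and a nonempty
-- individuals list, min([]) raises ValueError (and B's pq[0] raises IndexError).
def Pre_divide_into_groups (individuals : List (String × Int)) (num_groups : Int) (target_sum : Int) : Prop :=
  individuals = [] ∨ 1 ≤ num_groups
instance (individuals : List (String × Int)) (num_groups : Int) (target_sum : Int) : Decidable (Pre_divide_into_groups individuals num_groups target_sum) := by unfold Pre_divide_into_groups; infer_instance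

def pvWitness_divide_into_groups : (List (String × Int)) × Int × Int := ([("a", 3), ("b", 1), ("c", 2)], 2, 0)

def Spec_divide_into_groups (individuals : List (String × Int)) (num_groups : Int) (target_sum : Int) (out : (List (List (String × Int))) × List Int) : Prop := out = divide_into_groups_alt individuals num_groups target_sum
instance (individuals : List (String × Int)) (num_groups : Int) (target_sum : Int) (out : (List (List (String × Int))) × List Int) : Decidable (Spec_divide_into_groups individuals num_groups target_sum out) := by unfold Spec_divide_into_groups; infer_instance

-- ===== CLAIM (what is proved, stated in full; the proofs are below) =====
def Claim_equal_divide_into_groups : Prop := ∀ (individuals : List (String × Int)) (num_groups : Int) (target_sum : Int), Dom_divide_into_groups individuals num_groups target_sum → Pre_divide_into_groups individuals num_groups target_sum → Spec_divide_into_groups individuals num_groups target_sum (divide_into_groups individuals num_groups target_sum)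

-- ===== LEMMAS AND PROOFS =====

-- Python's tuple '<' on pairs of ints
def pvPlt (a b : Int × Int) : Prop := a.1 < b.1 ∨ (a.1 = b.1 ∧ a.2 < b.2)

-- the multiset B's queue tracks: group sums paired with their indices
def pvEPairs (sums : List Int) : List (Int × Int) :=
  (PySem.List.enumerate sums).map (fun p => (p.2, p.1))

theorem pvPlt_trans {a b c : Int × Int} (h1 : pvPlt a b) (h2 : pvPlt b c) : pvPlt a c := by
  unfold pvPlt at *; omega

theorem pvPlt_total {a b : Int × Int} (h : a.2 ≠ b.2) : pvPlt a b ∨ pvPlt b a := by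
  unfold pvPlt; omega

theorem perm_pvInsertPQ (p : Int × Int) (l : List (Int × Int)) :
    (pvInsertPQ p l).Perm (p :: l) := by
  induction l with
  | nil => simp [pvInsertPQ]
  | cons q t ih =>
      simp only [pvInsertPQ]
      split
      · exact ((ih.cons q).trans (List.Perm.swap p q t)).symm.symm
      · exact List.Perm.refl _

theorem mem_pvInsertPQ {x p : Int × Int} {l : List (Int × Int)} (h : x ∈ pvInsertPQ p l) :
    x = p ∨ x ∈ l := by
  have := (perm_pvInsertPQ p l).mem_iff.mp h
  simpa using this

theorem pairwise_pvInsertPQ (p : Int × Int) (l : List (Int × Int))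
    (hl : l.Pairwise pvPlt) (hne : ∀ q ∈ l, q.2 ≠ p.2) :
    (pvInsertPQ p l).Pairwise pvPlt := by
  induction l with
  | nil => simp [pvInsertPQ]
  | cons q t ih =>
      rw [List.pairwise_cons] at hl
      simp only [pvInsertPQ]
      split
      · rename_i hq
        refine List.pairwise_cons.mpr ⟨?_, ih hl.2 (fun x hx => hne x (List.mem_cons_of_mem q hx))⟩
        intro x hx
        rcases mem_pvInsertPQ hx with rfl | hx
        · exact hq
        · exact hl.1 x hx
      · rename_i hq
        have hpq : pvPlt p q := by
          rcases pvPlt_total (a := q) (b := p) (hne q (by simp)) with h | h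
          · exact absurd h hq
          · exact h
        refine List.pairwise_cons.mpr ⟨?_, List.pairwise_cons.mpr ⟨hl.1, hl.2⟩⟩
        intro x hx
        rcases List.mem_cons.mp hx with rfl | hx
        · exact hpq
        · exact pvPlt_trans hpq (hl.1 x hx)

theorem pvEPairs_length (sums : List Int) : (pvEPairs sums).length = sums.length := by
  simp [pvEPairs, PySem.List.length_enumerate]

theorem mem_pvEPairs {sums : List Int} {p : Int × Int} :
    p ∈ pvEPairs sums ↔ ∃ (k : Nat) (h : k < sums.length), p = (sums[k], (k : Int)) := by
  simp only [pvEPairs, List.mem_map, PySem.List.mem_enumerate_iff]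
  constructor
  · rintro ⟨q, ⟨k, hk, rfl⟩, rfl⟩; exact ⟨k, hk, by simp⟩
  · rintro ⟨k, hk, rfl⟩; exact ⟨((k : Int), sums[k]), ⟨k, hk, by simp⟩, rfl⟩

theorem pairwise_snd_pvEPairs (sums : List Int) :
    (pvEPairs sums).Pairwise (fun a b => a.2 ≠ b.2) := by
  have := PySem.List.pairwise_lt_enumerate (xs := sums) (s := 0)
  unfold pvEPairs
  exact (List.pairwise_map.mpr (this.imp (by intro a b h; simpa using Int.ne_of_lt h)))

theorem pvEPairs_getElem (sums : List Int) (k : Nat) (hk : k < sums.length) :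
    (pvEPairs sums)[k]'(by rw [pvEPairs_length]; exact hk) = (sums[k], (k : Int)) := by
  simp [pvEPairs, PySem.List.getElem_enumerate]

theorem enumerate_set {α : Type} (xs : List α) (k : Nat) (v : α) (s : Int) :
    PySem.List.enumerate (xs.set k v) s = (PySem.List.enumerate xs s).set k (s + k, v) := by
  induction xs generalizing k s with
  | nil => simp [PySem.List.enumerate_nil]
  | cons x t ih =>
      cases k with
      | zero => simp [PySem.List.enumerate_cons]
      | succ k =>
          simp only [List.set_cons_succ, PySem.List.enumerate_cons]
          rw [ih]
          have : s + 1 + (k : Int) = s + ((k : Nat) + 1 : Nat) := by push_cast; omega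
          rw [this]

theorem pvEPairs_set (sums : List Int) (k : Nat) (v : Int) :
    pvEPairs (sums.set k v) = (pvEPairs sums).set k (v, (k : Int)) := by
  simp only [pvEPairs]
  rw [enumerate_set, List.map_set]
  simp

-- popping the head of a list that is a permutation of L with head L[k]: the rest is L minus slot k
theorem perm_set_of_cons_perm {α : Type} (L : List α) (k : Nat) (hk : k < L.length)
    (p : α) (rest : List α) (h : (L[k] :: rest).Perm L) :
    (p :: rest).Perm (L.set k p) := by
  have hL : L = L.take k ++ L[k] :: L.drop (k + 1) := by
    conv_lhs => rw [← List.set_getElem_self hk]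
    exact List.set_eq_take_cons_drop _ hk
  have h1 : L.Perm (L[k] :: L.eraseIdx k) := by
    rw [List.eraseIdx_eq_take_drop_succ]
    conv_lhs => rw [hL]
    exact List.perm_middle
  have hrest : rest.Perm (L.eraseIdx k) := (h.trans h1).cons_inv
  have h2 : (L.set k p).Perm (p :: L.eraseIdx k) := by
    rw [List.set_eq_take_cons_drop _ hk, List.eraseIdx_eq_take_drop_succ]
    exact List.perm_middle
  exact (hrest.cons p).trans h2.symm

-- the head of B's queue is exactly A's (min value, first index of the min)
theorem pv_head_min (sums : List Int) (s i : Int) (rest : List (Int × Int))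
    (hperm : ((s, i) :: rest).Perm (pvEPairs sums))
    (hpw : ((s, i) :: rest).Pairwise pvPlt) :
    0 ≤ i ∧ i.toNat < sums.length ∧ sums[i.toNat]? = some s ∧
      PySem.List.min? sums (fun x => x) = some s ∧
      PySem.List.index? sums s = some i.toNat := by
  have hhead : (s, i) ∈ pvEPairs sums := hperm.subset (by simp)
  obtain ⟨k, hk, hpair⟩ := mem_pvEPairs.mp hhead
  obtain ⟨hs, hi⟩ := Prod.mk.inj hpair
  have h0 : 0 ≤ i := by omega
  have hkn : i.toNat = k := by omega
  have hforall : ∀ j (hj : j < sums.length), s ≤ sums[j] ∧ (sums[j] = s → k ≤ j) := by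
    intro j hj
    have hm : (sums[j], (j : Int)) ∈ (s, i) :: rest :=
      hperm.symm.subset (mem_pvEPairs.mpr ⟨j, hj, rfl⟩)
    rcases List.mem_cons.mp hm with heq | hmem
    · obtain ⟨h1, h2⟩ := Prod.mk.inj heq
      constructor
      · omega
      · intro _; omega
    · have hplt := (List.pairwise_cons.mp hpw).1 _ hmem
      unfold pvPlt at hplt
      simp only at hplt
      constructor
      · omega
      · intro hje; omega
  have hsmem : s ∈ sums := by
    rw [hs]; exact List.getElem_mem hk
  refine ⟨h0, by omega, ?_, ?_, ?_⟩
  · rw [List.getElem?_eq_getElem (by omega)]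
    simp only [hkn, ← hs]
  · cases hmo : PySem.List.min? sums (fun x => x) with
    | none =>
        have : sums = [] := (PySem.List.min?_eq_none_iff sums (fun x => x)).mp hmo
        subst this; simp at hk
    | some m =>
        have hmmem : m ∈ sums := PySem.List.min?_mem hmo
        have hmmin : ∀ y ∈ sums, m ≤ y := by
          intro y hy; exact PySem.List.min?_isMin hmo y hy
        obtain ⟨jm, hjm, hjme⟩ := List.mem_iff_getElem.mp hmmem
        have h1 : s ≤ m := by rw [← hjme]; exact (hforall jm hjm).1
        have h2 : m ≤ s := hmmin s hsmem
        rw [show m = s by omega]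
  · rw [PySem.List.index?_eq_some_iff]
    refine ⟨sums.take k, sums.drop (k + 1), ?_, by simp [hkn]; omega, ?_⟩
    · conv_lhs => rw [← List.set_getElem_self hk]
      rw [List.set_eq_take_cons_drop _ hk, ← hs]
    · intro hmemtake
      obtain ⟨jt, hjt, hjte⟩ := List.mem_iff_getElem.mp hmemtake
      rw [List.getElem_take] at hjte
      have hjlt : jt < k := by
        have := hjt; simp [List.length_take] at this; omega
      have := (hforall jt (by omega)).2 hjte
      omega

-- main loop invariant: the two folds keep equal (groups, sums) states
theorem pv_loop (l : List (String × Int)) :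
    ∀ (groups : List (List (String × Int))) (sums : List Int) (pq : List (Int × Int)),
      sums ≠ [] → pq.Pairwise pvPlt → pq.Perm (pvEPairs sums) →
      l.foldl pvStepA (groups, sums) = (l.foldl pvStepB ((groups, sums), pq)).1 := by
  induction l with
  | nil => intro groups sums pq _ _ _; rfl
  | cons ind t ih =>
      intro groups sums pq hne hpw hperm
      cases pq with
      | nil =>
          exfalso
          have hlen := hperm.length_eq
          rw [pvEPairs_length] at hlen
          simp at hlen
          exact hne (List.eq_nil_of_length_eq_zero hlen.symm)
      | cons hd rest =>
          obtain ⟨s, i⟩ := hd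
          obtain ⟨h0, hilt, hget, hmin, hidx⟩ := pv_head_min sums s i rest hperm hpw
          have hgd : sums.getD i.toNat 0 = s := by
            rw [List.getD_eq_getElem?_getD, hget]; rfl
          have hA : pvStepA (groups, sums) ind
              = (groups.modify i.toNat (fun g => g ++ [ind]), sums.set i.toNat (s + ind.2)) := by
            simp only [pvStepA, hmin, hidx, Option.getD_some, hgd]
          have hB : pvStepB ((groups, sums), (s, i) :: rest) ind
              = ((groups.modify i.toNat (fun g => g ++ [ind]), sums.set i.toNat (s + ind.2)),
                 pvInsertPQ (s + ind.2, i) rest) := rfl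
          have hsget : sums[i.toNat] = s := by
            have h := hget
            rw [List.getElem?_eq_getElem hilt] at h
            exact Option.some.inj h
          have hi' : i = (i.toNat : Int) := by omega
          have hne' : sums.set i.toNat (s + ind.2) ≠ [] := by
            intro h
            apply hne
            have := congrArg List.length h
            simp at this
            exact this
          have hsnd : ∀ q ∈ rest, q.2 ≠ i := by
            have hpw2 : ((s, i) :: rest).Pairwise (fun a b : Int × Int => a.2 ≠ b.2) :=
              (List.Perm.pairwise_iff (fun {_ _} h => h.symm) hperm).mpr
                (pairwise_snd_pvEPairs sums)
            intro q hq h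
            exact ((List.pairwise_cons.mp hpw2).1 q hq) h.symm
          have hpw' : (pvInsertPQ (s + ind.2, i) rest).Pairwise pvPlt :=
            pairwise_pvInsertPQ _ _ (List.pairwise_cons.mp hpw).2 (fun q hq => hsnd q hq)
          have hperm' : (pvInsertPQ (s + ind.2, i) rest).Perm
              (pvEPairs (sums.set i.toNat (s + ind.2))) := by
            refine (perm_pvInsertPQ _ _).trans ?_
            rw [pvEPairs_set, ← hi']
            refine perm_set_of_cons_perm _ i.toNat (by rw [pvEPairs_length]; exact hilt) _ rest ?_
            rw [pvEPairs_getElem sums i.toNat hilt, hsget, ← hi']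
            exact hperm
          simp only [List.foldl_cons, hA, hB]
          exact ih _ _ _ hne' hpw' hperm'

theorem enumerate_replicate (n : Nat) (s : Int) :
    PySem.List.enumerate (List.replicate n (0 : Int)) s
      = (List.range n).map (fun k : Nat => (s + (k : Int), (0 : Int))) := by
  induction n generalizing s with
  | zero => simp [PySem.List.enumerate_nil]
  | succ n ih =>
      rw [List.replicate_succ, PySem.List.enumerate_cons, ih (s + 1), List.range_succ_eq_map]
      simp only [List.map_cons, List.map_map]
      congr 1
      · norm_num
      · apply List.map_congr_left
        intro k _
        simp only [Function.comp_apply]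
        congr 1
        push_cast
        ring
theorem pvEPairs_replicate (n : Nat) :
    pvEPairs (List.replicate n (0 : Int))
      = (List.range n).map (fun i : Nat => ((0 : Int), (i : Int))) := by
  simp only [pvEPairs]
  rw [enumerate_replicate]
  simp [List.map_map, Function.comp]

theorem init_pq_pairwise (n : Nat) :
    ((List.range n).map (fun i : Nat => ((0 : Int), (i : Int)))).Pairwise pvPlt := by
  refine List.pairwise_map.mpr ?_
  refine List.pairwise_lt_range.imp ?_
  intro a b h
  exact Or.inr ⟨rfl, by simpa using (Int.ofNat_lt.mpr h)⟩

-- ===== VERDICT (by name: the statement is the Claim_ definition above) =====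
theorem divide_into_groups_spec : Claim_equal_divide_into_groups := by
  intro individuals num_groups target_sum _ hpre
  unfold Spec_divide_into_groups divide_into_groups divide_into_groups_alt
  rcases hpre with hnil | hpos
  · subst hnil
    rfl
  · apply pv_loop
    · exact List.ne_nil_of_length_pos (by simp; omega)
    · exact init_pq_pairwise num_groups.toNat
    · rw [pvEPairs_replicate]
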